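-- pv_equiv track=rewrite | github.com/encgoo/IntroductionToAlgorithms | DataStruct/ElementaryDataStruct/String/WeightedUniformStrings.py | wus
-- ===== SOURCE A (Python) =====
-- def wus(lst, arr):
--     m = {}
--     for i in range(26):
--         m[chr(i + 97)] = i + 1
--
--     # use a set instead of an array
--     sw = set()
--     sw.add(m[lst[0]])
--     cnt = 1
--     ind = 1
--     n = len(lst)
--     while ind < n:
--         if lst[ind] != lst[ind - 1]:
--             # new char
--             sw.add(m[lst[ind]])
--             cnt = 1
--         else:
--             cnt += 1
--             sw.add((m[lst[ind]]) * cnt)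
--
--         ind += 1
--
--     ret = []
--
--     for i in arr:
--         if i in sw:
--             ret.append('Yes')
--         else:
--             ret.append('No')
--
--     return ret
-- ===== SOURCE B (Python) =====
-- def wus(lst, arr):
--     weight = {chr(i + 97): i + 1 for i in range(26)}
--     # longest run of each character; a weight x is achievable iff some char c
--     # with weight w has a run of length >= x/w, i.e. w divides x and x//w <= maxrun[c]
--     maxrun = {}
--     run = 0
--     prev = None
--     for ch in lst:
--         run = run + 1 if ch == prev else 1
--         prev = ch
--         if run > maxrun.get(ch, 0):
--             maxrun[ch] = run
--     def ok(x):
--         for ch, top in maxrun.items():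
--             w = weight[ch]
--             if x % w == 0 and 1 <= x // w <= top:
--                 return True
--         return False
--     return ['Yes' if ok(x) else 'No' for x in arr]
-- ===== Notes on version B (the rewrite author's own statement) =====
-- stated objective: alternative
-- what changed: Instead of A's set of every achievable run-multiple, B keeps only the longest run per character (a <=26-entry dict) and answers each query arithmetically: x is achievable iff some character's weight w divides x with 1 <= x//w <= maxrun.
import Mathlib
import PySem

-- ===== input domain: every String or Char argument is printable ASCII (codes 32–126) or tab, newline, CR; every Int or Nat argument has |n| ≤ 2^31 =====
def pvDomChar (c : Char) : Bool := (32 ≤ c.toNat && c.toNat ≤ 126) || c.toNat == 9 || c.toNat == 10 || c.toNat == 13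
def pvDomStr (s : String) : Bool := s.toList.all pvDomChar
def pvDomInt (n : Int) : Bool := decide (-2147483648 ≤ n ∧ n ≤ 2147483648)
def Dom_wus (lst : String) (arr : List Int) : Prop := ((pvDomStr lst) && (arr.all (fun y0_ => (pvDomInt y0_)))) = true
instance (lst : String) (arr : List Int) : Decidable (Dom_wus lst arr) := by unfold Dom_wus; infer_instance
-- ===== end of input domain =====

-- B keeps only the LONGEST run of each character (a ≤26-entry dict) and answers each query x
-- by arithmetic — w divides x and x//w ≤ maxrun — instead of A's set of all run-multiples.

-- ===== PORT A =====
-- KeyError (char outside 'a'..'z') and IndexError (lst[0] of "") are excluded by Pre_wus; getD/pyGetD defaults stand in for the raising lookups.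
def wus (lst : String) (arr : List Int) : List String :=
  let m : PySem.Dict Char Int :=
    (PySem.List.pyRange 0 26).foldl (fun m i => PySem.Dict.insert m (Char.ofNat (i + 97).toNat) (i + 1)) PySem.Dict.empty
  let cs := lst.toList
  let sw : PySem.Set Int := PySem.Set.add PySem.Set.empty (PySem.Dict.getD m (PySem.List.pyGetD cs 0 ' ') 0)
  let st := (PySem.List.pyRange 1 (cs.length : Int)).foldl
    (fun (st : PySem.Set Int × Int) ind =>
      if PySem.List.pyGetD cs ind ' ' ≠ PySem.List.pyGetD cs (ind - 1) ' ' then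
        (PySem.Set.add st.1 (PySem.Dict.getD m (PySem.List.pyGetD cs ind ' ') 0), (1 : Int))
      else
        (PySem.Set.add st.1 (PySem.Dict.getD m (PySem.List.pyGetD cs ind ' ') 0 * (st.2 + 1)), st.2 + 1))
    (sw, 1)
  arr.foldl (fun ret i => ret ++ [if PySem.Set.contains st.1 i then "Yes" else "No"]) []

-- ===== PORT B =====
-- Source B: one pass keeps maxrun[ch] = longest run of ch (state run/prev/dict); ok(x) scans the
-- ≤26 items testing divisibility and the quotient bound. weight[ch] raising KeyError (char
-- outside 'a'..'z') is excluded by Pre_wus; getD's default stands in for the raising lookup.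
def wus_alt (lst : String) (arr : List Int) : List String :=
  let weight : PySem.Dict Char Int :=
    (PySem.List.pyRange 0 26).foldl (fun m i => PySem.Dict.insert m (Char.ofNat (i + 97).toNat) (i + 1)) PySem.Dict.empty
  let st := lst.toList.foldl
    (fun (st : Int × Option Char × PySem.Dict Char Int) ch =>
      let run : Int := if some ch == st.2.1 then st.1 + 1 else 1
      (run, some ch, if PySem.Dict.getD st.2.2 ch 0 < run then PySem.Dict.insert st.2.2 ch run else st.2.2))
    (0, none, PySem.Dict.empty)
  let maxrun := st.2.2
  let ok : Int → Bool := fun x =>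
    maxrun.items.any (fun p =>
      let w := PySem.Dict.getD weight p.1 0
      PySem.Int.mod x w == 0 && (decide (1 ≤ PySem.Int.floordiv x w) && decide (PySem.Int.floordiv x w ≤ p.2)))
  arr.map (fun x => if ok x then "Yes" else "No")

-- ===== PRECONDITION & SPEC =====
-- Pre_ excludes exactly the inputs where Python A raises: the empty string (IndexError on lst[0]) and strings with a character outside 'a'..'z' (KeyError on m[...]).
def Pre_wus (lst : String) (arr : List Int) : Prop :=
  lst.toList ≠ [] ∧ lst.toList.all (fun c => 97 ≤ c.toNat && c.toNat ≤ 122) = true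
instance (lst : String) (arr : List Int) : Decidable (Pre_wus lst arr) := by unfold Pre_wus; infer_instance
def pvWitness_wus : String × List Int := ("aab", [1, 2, 3])

def Spec_wus (lst : String) (arr : List Int) (out : List String) : Prop := out = wus_alt lst arr
instance (lst : String) (arr : List Int) (out : List String) : Decidable (Spec_wus lst arr out) := by unfold Spec_wus; infer_instance

-- ===== CLAIM (what is proved, stated in full; the proofs are below) =====
def Claim_equal_wus : Prop := ∀ (lst : String) (arr : List Int), Dom_wus lst arr → Pre_wus lst arr → Spec_wus lst arr (wus lst arr)

-- ===== LEMMAS AND PROOFS =====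

-- the sequence of (character, current-run-count) pairs A's loop walks over lst[1:]
def pvRuns : Char → Int → List Char → List (Char × Int)
  | _, _, [] => []
  | prev, cnt, x :: xs =>
    if x ≠ prev then (x, 1) :: pvRuns x 1 xs else (x, cnt + 1) :: pvRuns x (cnt + 1) xs

-- B's conditional max-update, one step
def pvUpd (d : PySem.Dict Char Int) (p : Char × Int) : PySem.Dict Char Int :=
  if PySem.Dict.getD d p.1 0 < p.2 then PySem.Dict.insert d p.1 p.2 else d

-- A's index-based fold over pyRange k..n equals the fold over (prev, cur) pairs of the tail
theorem pvA_bridge (M : Char → Int) (all : List Char) :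
    ∀ (k : Nat), 1 ≤ k → ∀ (init : PySem.Set Int × Int),
    (PySem.List.pyRange (k : Int) (all.length : Int)).foldl
      (fun st ind =>
        if PySem.List.pyGetD all ind ' ' ≠ PySem.List.pyGetD all (ind - 1) ' ' then
          (PySem.Set.add st.1 (M (PySem.List.pyGetD all ind ' ')), (1 : Int))
        else
          (PySem.Set.add st.1 (M (PySem.List.pyGetD all ind ' ') * (st.2 + 1)), st.2 + 1))
      init
    = ((all.drop (k - 1)).zip (all.drop k)).foldl
      (fun st p =>
        if p.2 ≠ p.1 then (PySem.Set.add st.1 (M p.2), (1 : Int))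
        else (PySem.Set.add st.1 (M p.2 * (st.2 + 1)), st.2 + 1))
      init := by
  intro k hk init
  induction hN : all.length - k generalizing k init with
  | zero =>
    rw [PySem.List.pyRange_one_eq_nil (by omega),
      List.drop_eq_nil_of_le (as := all) (i := k) (by omega), List.zip_nil_right]
    rfl
  | succ n ih =>
    have h : k < all.length := by omega
    have hk1 : k - 1 < all.length := by omega
    have hcast : (k : Int) - 1 = ((k - 1 : Nat) : Int) := by omega
    rw [PySem.List.pyRange_one_cons (by exact_mod_cast h)]
    rw [List.drop_eq_getElem_cons hk1, List.drop_eq_getElem_cons h]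
    have hk11 : k - 1 + 1 = k := by omega
    rw [hk11, List.drop_eq_getElem_cons h]
    simp only [List.zip_cons_cons, List.foldl_cons]
    rw [hcast]
    simp only [PySem.List.pyGetD_natCast, List.getD_eq_getElem _ _ hk1, List.getD_eq_getElem _ _ h]
    have hih := fun init => ih (k + 1) (by omega) init (by omega)
    push_cast at hih ⊢
    rw [hih]
    rw [← List.drop_eq_getElem_cons h]

-- the pair fold's set is the fold of the run-multiples M p.1 * p.2 over pvRuns
theorem pvA_runs (M : Char → Int) :
    ∀ (xs : List Char) (prev : Char) (cnt : Int) (sw : PySem.Set Int),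
    (((prev :: xs).zip xs).foldl
      (fun st p =>
        if p.2 ≠ p.1 then (PySem.Set.add st.1 (M p.2), (1 : Int))
        else (PySem.Set.add st.1 (M p.2 * (st.2 + 1)), st.2 + 1))
      (sw, cnt)).1
    = ((pvRuns prev cnt xs).map (fun p => M p.1 * p.2)).foldl PySem.Set.add sw := by
  intro xs
  induction xs with
  | nil => intro prev cnt sw; rfl
  | cons x xs ih =>
    intro prev cnt sw
    simp only [List.zip_cons_cons, List.foldl_cons, pvRuns]
    by_cases h : x ≠ prev
    · rw [if_pos h, if_pos h]
      simpa [mul_one] using ih x 1 (PySem.Set.add sw (M x))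
    · rw [if_neg h, if_neg h]
      simpa using ih x (cnt + 1) (PySem.Set.add sw (M x * (cnt + 1)))

-- B's character fold produces exactly the pvUpd fold over pvRuns
theorem pvB_fold :
    ∀ (xs : List Char) (prev : Char) (cnt : Int) (d : PySem.Dict Char Int),
    (xs.foldl
      (fun (st : Int × Option Char × PySem.Dict Char Int) ch =>
        let run : Int := if some ch == st.2.1 then st.1 + 1 else 1
        (run, some ch, if PySem.Dict.getD st.2.2 ch 0 < run then PySem.Dict.insert st.2.2 ch run else st.2.2))
      (cnt, some prev, d)).2.2
    = (pvRuns prev cnt xs).foldl pvUpd d := by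
  intro xs
  induction xs with
  | nil => intro prev cnt d; rfl
  | cons x xs ih =>
    intro prev cnt d
    simp only [List.foldl_cons, pvRuns]
    by_cases h : x = prev
    · subst h
      have hb : (some x == some x) = true := by simp
      simp only [hb, if_true]
      rw [if_neg (by simp : ¬ x ≠ x)]
      simpa [pvUpd] using ih x (cnt + 1) (pvUpd d (x, cnt + 1))
    · rw [if_pos h]
      have hb : (some x == some prev) = false := by simpa using h
      simp only [hb]
      simpa [pvUpd] using ih x 1 (pvUpd d (x, 1))

theorem pvUpd_nodup : ∀ (l : List (Char × Int)) (d : PySem.Dict Char Int),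
    d.keys.Nodup → (l.foldl pvUpd d).keys.Nodup := by
  intro l
  induction l with
  | nil => intro d h; exact h
  | cons p l ih =>
    intro d h
    refine ih _ ?_
    unfold pvUpd
    split_ifs
    · exact PySem.Dict.nodup_keys_insert d p.1 p.2 h
    · exact h

theorem pvUpd_mono : ∀ (l : List (Char × Int)) (d : PySem.Dict Char Int) (c : Char),
    PySem.Dict.getD d c 0 ≤ PySem.Dict.getD (l.foldl pvUpd d) c 0 := by
  intro l
  induction l with
  | nil => intro d c; simp
  | cons p l ih =>
    intro d c
    refine le_trans ?_ (ih (pvUpd d p) c)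
    unfold pvUpd
    split_ifs with h
    · rw [PySem.Dict.getD_insert]
      split_ifs with hc
      · subst hc; omega
      · omega
    · omega

theorem pvUpd_ge : ∀ (l : List (Char × Int)) (d : PySem.Dict Char Int) (p : Char × Int),
    p ∈ l → p.2 ≤ PySem.Dict.getD (l.foldl pvUpd d) p.1 0 := by
  intro l
  induction l with
  | nil => intro d p h; simp at h
  | cons q l ih =>
    intro d p hp
    rcases List.mem_cons.mp hp with h | h
    · subst h
      refine le_trans ?_ (pvUpd_mono l (pvUpd d p) p.1)
      unfold pvUpd
      split_ifs with h
      · rw [PySem.Dict.getD_insert, if_pos rfl]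
      · omega
    · exact ih (pvUpd d q) p h

theorem pvUpd_from (R : List (Char × Int)) :
    ∀ (l : List (Char × Int)) (d : PySem.Dict Char Int),
    (∀ q ∈ l, q ∈ R) →
    (∀ c, PySem.Dict.getD d c 0 = 0 ∨ (c, PySem.Dict.getD d c 0) ∈ R) →
    ∀ c, PySem.Dict.getD (l.foldl pvUpd d) c 0 = 0 ∨ (c, PySem.Dict.getD (l.foldl pvUpd d) c 0) ∈ R := by
  intro l
  induction l with
  | nil => intro d _ hd c; exact hd c
  | cons q l ih =>
    intro d hl hd c
    refine ih (pvUpd d q) (fun r hr => hl r (List.mem_cons_of_mem q hr)) ?_ c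
    intro c'
    unfold pvUpd
    split_ifs with h
    · rw [PySem.Dict.getD_insert]
      split_ifs with hc
      · right; subst hc; exact hl q (List.mem_cons_self)
      · exact hd c'
    · exact hd c'

theorem pvRuns_pos : ∀ (xs : List Char) (prev : Char) (cnt : Int), 0 ≤ cnt →
    ∀ p ∈ pvRuns prev cnt xs, 1 ≤ p.2 := by
  intro xs
  induction xs with
  | nil => intro prev cnt _ p h; simp [pvRuns] at h
  | cons x xs ih =>
    intro prev cnt hc p hp
    unfold pvRuns at hp
    split_ifs at hp with h
    · rcases List.mem_cons.mp hp with h' | h'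
      · subst h'; norm_num
      · exact ih x 1 (by norm_num) p h'
    · rcases List.mem_cons.mp hp with h' | h'
      · subst h'; simp; omega
      · exact ih x (cnt + 1) (by omega) p h'

theorem pvRuns_chars : ∀ (xs : List Char) (prev : Char) (cnt : Int),
    ∀ p ∈ pvRuns prev cnt xs, p.1 ∈ xs := by
  intro xs
  induction xs with
  | nil => intro prev cnt p h; simp [pvRuns] at h
  | cons x xs ih =>
    intro prev cnt p hp
    unfold pvRuns at hp
    split_ifs at hp with h <;>
      rcases List.mem_cons.mp hp with h' | h'
    · subst h'; exact List.mem_cons_self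
    · exact List.mem_cons_of_mem x (ih x 1 p h')
    · subst h'; exact List.mem_cons_self
    · exact List.mem_cons_of_mem x (ih x (cnt + 1) p h')

theorem pvRuns_down : ∀ (xs : List Char) (prev : Char) (cnt : Int) (c : Char) (k j : Int),
    (c, k) ∈ pvRuns prev cnt xs → 1 ≤ j → j ≤ k →
    (c, j) ∈ pvRuns prev cnt xs ∨ (c = prev ∧ j ≤ cnt) := by
  intro xs
  induction xs with
  | nil => intro prev cnt c k j h _ _; simp [pvRuns] at h
  | cons x xs ih =>
    intro prev cnt c k j hk hj1 hjk
    unfold pvRuns at hk ⊢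
    split_ifs at hk ⊢ with h
    · rcases List.mem_cons.mp hk with h' | h'
      · injection h' with hc hk1
        subst hc
        have : j = 1 := by omega
        subst this
        exact Or.inl List.mem_cons_self
      · rcases ih x 1 c k j h' hj1 hjk with h'' | ⟨hc, hj⟩
        · exact Or.inl (List.mem_cons_of_mem _ h'')
        · subst hc
          have : j = 1 := by omega
          subst this
          exact Or.inl List.mem_cons_self
    · rcases List.mem_cons.mp hk with h' | h'
      · injection h' with hc hk1
        subst hc
        by_cases hje : j = cnt + 1
        · subst hje; exact Or.inl List.mem_cons_self
        · rw [not_not] at h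
          exact Or.inr ⟨h.symm ▸ rfl, by omega⟩
      · rcases ih x (cnt + 1) c k j h' hj1 hjk with h'' | ⟨hc, hj⟩
        · exact Or.inl (List.mem_cons_of_mem _ h'')
        · subst hc
          by_cases hje : j = cnt + 1
          · subst hje; exact Or.inl List.mem_cons_self
          · rw [not_not] at h
            exact Or.inr ⟨h.symm ▸ rfl, by omega⟩

-- the weight dict of both ports maps 'a'..'z' to 1..26
theorem pvW_val (c : Char) (h1 : 97 ≤ c.toNat) (h2 : c.toNat ≤ 122) :
    PySem.Dict.getD
      ((PySem.List.pyRange 0 26).foldl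
        (fun m i => PySem.Dict.insert m (Char.ofNat (i + 97).toNat) (i + 1)) PySem.Dict.empty)
      c 0 = (c.toNat : Int) - 96 := by
  have hc := Char.ofNat_toNat c
  set n := c.toNat with hn
  rw [← hc]
  interval_cases n <;> decide

-- the crux: a weight is a run-multiple of R iff some maxrun-dict key divides it with quotient in range
theorem pvMain (M : Char → Int) (R : List (Char × Int)) (x : Int)
    (hpos : ∀ p ∈ R, 1 ≤ p.2)
    (hw : ∀ p ∈ R, 1 ≤ M p.1)
    (hdown : ∀ c k j, (c, k) ∈ R → 1 ≤ j → j ≤ k → (c, j) ∈ R) :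
    ((∃ p ∈ R, x = M p.1 * p.2) ↔
      ∃ c ∈ (R.foldl pvUpd PySem.Dict.empty).keys,
        PySem.Int.mod x (M c) = 0 ∧ 1 ≤ PySem.Int.floordiv x (M c) ∧
          PySem.Int.floordiv x (M c) ≤ PySem.Dict.getD (R.foldl pvUpd PySem.Dict.empty) c 0) := by
  set D := R.foldl pvUpd PySem.Dict.empty with hD
  constructor
  · rintro ⟨⟨c, k⟩, hpR, hx⟩
    have hwc : 1 ≤ M c := hw _ hpR
    have hk1 : 1 ≤ k := hpos _ hpR
    have hdvd : M c ∣ x := ⟨k, hx⟩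
    have hfd : PySem.Int.floordiv x (M c) = k := by
      rw [PySem.Int.floordiv_eq_ediv_of_pos (a := x) (b := M c) (by omega), hx,
        Int.mul_ediv_cancel_left (a := M c) k (by omega)]
    have hge : k ≤ PySem.Dict.getD D c 0 := pvUpd_ge R PySem.Dict.empty (c, k) hpR
    have hmem : c ∈ D.keys := by
      rw [← PySem.Dict.contains_iff_mem_keys]
      cases hcc : D.contains c with
      | false =>
        have h0 := PySem.Dict.getD_of_not_contains D (0 : Int) hcc
        omega
      | true => rfl
    exact ⟨c, hmem, (PySem.Int.mod_eq_zero_iff_dvd x (M c)).mpr hdvd, by omega, by omega⟩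
  · rintro ⟨c, hmem, hmod, hq1, hqL⟩
    set L := PySem.Dict.getD D c 0 with hL
    have hcases : L = 0 ∨ (c, L) ∈ R :=
      pvUpd_from R R PySem.Dict.empty (fun q hq => hq) (fun c' => Or.inl (by simp)) c
    have hL1 : 1 ≤ L := le_trans hq1 hqL
    have hcL : (c, L) ∈ R := by rcases hcases with h | h; omega; exact h
    have hwc : 1 ≤ M c := hw _ hcL
    obtain ⟨m, hm⟩ := (PySem.Int.mod_eq_zero_iff_dvd x (M c)).mp hmod
    have hfd : PySem.Int.floordiv x (M c) = m := by
      rw [PySem.Int.floordiv_eq_ediv_of_pos (a := x) (b := M c) (by omega), hm,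
        Int.mul_ediv_cancel_left (a := M c) m (by omega)]
    have hq := hdown c L m hcL (by omega) (by omega)
    exact ⟨(c, m), hq, by rw [hm]⟩

-- ===== VERDICT (by name: the statement is the Claim_ definition above) =====
set_option maxHeartbeats 1000000 in
theorem wus_spec : Claim_equal_wus := by
  unfold Claim_equal_wus
  intro lst arr _ hpre
  unfold Spec_wus
  obtain ⟨c, t, hct⟩ := List.exists_cons_of_ne_nil hpre.1
  simp only [wus, wus_alt, hct]
  rw [PySem.List.foldl_append_singleton_eq_map, List.nil_append]
  have h0 : PySem.List.pyGetD (c :: t) 0 ' ' = c := by simp [PySem.List.pyGetD]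
  rw [h0]
  set W : PySem.Dict Char Int :=
    (PySem.List.pyRange 0 26).foldl (fun m i => PySem.Dict.insert m (Char.ofNat (i + 97).toNat) (i + 1)) PySem.Dict.empty with hW
  -- A's fold reduces to the run-multiples of pvRuns
  have hb := pvA_bridge (fun ch => PySem.Dict.getD W ch 0) (c :: t) 1 (le_refl 1)
    (PySem.Set.add PySem.Set.empty (PySem.Dict.getD W c 0), 1)
  simp only [Nat.cast_one, List.drop_zero, List.drop_succ_cons] at hb
  have hA := (congrArg Prod.fst hb).trans
    (pvA_runs (fun ch => PySem.Dict.getD W ch 0) t c 1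
      (PySem.Set.add PySem.Set.empty (PySem.Dict.getD W c 0)))
  rw [hA]
  -- B's fold reduces to the pvUpd fold over the same pvRuns
  have hstep : (List.foldl
      (fun (st : Int × Option Char × PySem.Dict Char Int) ch =>
        let run : Int := if some ch == st.2.1 then st.1 + 1 else 1
        (run, some ch, if PySem.Dict.getD st.2.2 ch 0 < run then PySem.Dict.insert st.2.2 ch run else st.2.2))
      (0, none, PySem.Dict.empty) (c :: t)).2.2
      = ((c, 1) :: pvRuns c 1 t).foldl pvUpd PySem.Dict.empty := by
    rw [List.foldl_cons, List.foldl_cons]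
    simpa [pvUpd] using pvB_fold t c 1 (PySem.Dict.insert PySem.Dict.empty c 1)
  rw [hstep]
  set R : List (Char × Int) := (c, 1) :: pvRuns c 1 t with hR
  set D := R.foldl pvUpd PySem.Dict.empty with hD
  -- the hypotheses of pvMain
  have hchars : ∀ p ∈ R, p.1 ∈ c :: t := by
    intro p hp
    rcases List.mem_cons.mp hp with h | h
    · subst h; exact List.mem_cons_self
    · exact List.mem_cons_of_mem c (pvRuns_chars t c 1 p h)
  have hrange : ∀ ch ∈ c :: t, 97 ≤ ch.toNat ∧ ch.toNat ≤ 122 := by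
    intro ch hch
    have := hpre.2
    rw [hct, List.all_eq_true] at this
    simpa using this ch hch
  have hw : ∀ p ∈ R, 1 ≤ PySem.Dict.getD W p.1 0 := by
    intro p hp
    obtain ⟨h1, h2⟩ := hrange p.1 (hchars p hp)
    rw [pvW_val p.1 h1 h2]
    omega
  have hpos : ∀ p ∈ R, 1 ≤ p.2 := by
    intro p hp
    rcases List.mem_cons.mp hp with h | h
    · subst h; norm_num
    · exact pvRuns_pos t c 1 (by norm_num) p h
  have hdown : ∀ c' k j, (c', k) ∈ R → 1 ≤ j → j ≤ k → (c', j) ∈ R := by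
    intro c' k j hk hj1 hjk
    rcases List.mem_cons.mp hk with h | h
    · injection h with h1 h2
      subst h1
      have : j = 1 := by omega
      subst this
      exact List.mem_cons_self
    · rcases pvRuns_down t c 1 c' k j h hj1 hjk with h' | ⟨hc', hj⟩
      · exact List.mem_cons_of_mem _ h'
      · subst hc'
        have : j = 1 := by omega
        subst this
        exact List.mem_cons_self
  have hmain := fun x => pvMain (fun ch => PySem.Dict.getD W ch 0) R x hpos hw hdown
  have hnodup : D.keys.Nodup := pvUpd_nodup R PySem.Dict.empty PySem.Dict.nodup_keys_empty
  -- pointwise over arr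
  apply List.map_congr_left
  intro x _
  suffices hsx :
      PySem.Set.contains
        (((pvRuns c 1 t).map (fun p => PySem.Dict.getD W p.1 0 * p.2)).foldl PySem.Set.add
          (PySem.Set.add PySem.Set.empty (PySem.Dict.getD W c 0))) x
      = D.items.any (fun p =>
          PySem.Int.mod x (PySem.Dict.getD W p.1 0) == 0 &&
            (decide (1 ≤ PySem.Int.floordiv x (PySem.Dict.getD W p.1 0)) &&
              decide (PySem.Int.floordiv x (PySem.Dict.getD W p.1 0) ≤ p.2))) by
    rw [hsx]
  -- left side: membership in the run-multiples
  have hleft :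
      PySem.Set.contains
        (((pvRuns c 1 t).map (fun p => PySem.Dict.getD W p.1 0 * p.2)).foldl PySem.Set.add
          (PySem.Set.add PySem.Set.empty (PySem.Dict.getD W c 0))) x = true
      ↔ ∃ p ∈ R, x = PySem.Dict.getD W p.1 0 * p.2 := by
    rw [show ((pvRuns c 1 t).map (fun p => PySem.Dict.getD W p.1 0 * p.2)).foldl PySem.Set.add
        (PySem.Set.add PySem.Set.empty (PySem.Dict.getD W c 0))
      = PySem.Set.update (PySem.Set.add PySem.Set.empty (PySem.Dict.getD W c 0))
          ((pvRuns c 1 t).map (fun p => PySem.Dict.getD W p.1 0 * p.2)) from rfl]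
    rw [PySem.Set.contains_iff, PySem.Set.mem_update, PySem.Set.mem_add, hR]
    simp only [List.mem_map, List.mem_cons, PySem.Set.empty]
    constructor
    · rintro (h | h)
      · simp at h
        rcases h with h
        exact ⟨(c, 1), Or.inl rfl, by simpa [mul_one] using h⟩
      · obtain ⟨p, hp, hfp⟩ := h
        exact ⟨p, Or.inr hp, hfp.symm⟩
    · rintro ⟨p, hp | hp, hx⟩
      · subst hp
        exact Or.inl (by simp [mul_one] at hx ⊢; exact hx)
      · exact Or.inr ⟨p, hp, hx.symm⟩
  -- right side: the items scan
  have hright :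
      D.items.any (fun p =>
          PySem.Int.mod x (PySem.Dict.getD W p.1 0) == 0 &&
            (decide (1 ≤ PySem.Int.floordiv x (PySem.Dict.getD W p.1 0)) &&
              decide (PySem.Int.floordiv x (PySem.Dict.getD W p.1 0) ≤ p.2))) = true
      ↔ ∃ c' ∈ D.keys,
          PySem.Int.mod x (PySem.Dict.getD W c' 0) = 0 ∧
            1 ≤ PySem.Int.floordiv x (PySem.Dict.getD W c' 0) ∧
              PySem.Int.floordiv x (PySem.Dict.getD W c' 0) ≤ PySem.Dict.getD D c' 0 := by
    rw [PySem.Dict.items_eq_map_keys D hnodup 0, List.any_eq_true]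
    constructor
    · rintro ⟨p, hp, hpred⟩
      obtain ⟨k, hk, rfl⟩ := List.mem_map.mp hp
      simp only [Bool.and_eq_true, beq_iff_eq, decide_eq_true_eq] at hpred
      exact ⟨k, hk, hpred.1, hpred.2.1, hpred.2.2⟩
    · rintro ⟨c', hc', h1, h2, h3⟩
      refine ⟨(c', PySem.Dict.getD D c' 0), List.mem_map.mpr ⟨c', hc', rfl⟩, ?_⟩
      simp only [Bool.and_eq_true, beq_iff_eq, decide_eq_true_eq]
      exact ⟨h1, h2, h3⟩
  have hiff := (hleft.trans (hmain x)).trans hright.symm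
  exact Bool.eq_iff_iff.mpr hiff
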